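-- pv_equiv track=rewrite | github.com/fangchenli/Blockchain-IOT | Utils.py | calculate_hashes_map
-- ===== SOURCE A (Python) =====
-- def calculate_hashes_map(merkle_tree_map):
--     """
--     Given a merkle tree map of a transaction, calculate the corresponding maps to the required transactions
--     in the merkle tree for SPV.
--     :param merkle_tree_map:
--     """
--     depth = len(merkle_tree_map)
--     maps = []
--     i = depth
--     while i > 0:
--         # for transaction at higher level, remove the last element of the tree map
--         if i < depth:
--             merkle_tree_map.pop()
--
--         # reverse one step of the map to get the complimentary transaction
--         merkle_tree_map[-1] *= -1
--
--         # add to the 2-d array that stores the maps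
--         maps.append(merkle_tree_map.copy())
--
--         # move counter
--         i -= 1
--     return maps
-- ===== SOURCE B (Python) =====
-- def calculate_hashes_map(merkle_tree_map):
--     """
--     Given a merkle tree map of a transaction, calculate the corresponding maps to the required
--     transactions in the merkle tree for SPV.
--
--     Each proof row is built freshly from a shrinking prefix of the input: the row is the
--     prefix with its last element negated. The input list is not modified.
--     :param merkle_tree_map:
--     """
--     maps = []
--     pfx = list(merkle_tree_map)
--     while pfx:
--         head = pfx[:-1]
--         maps.append(head + [-pfx[-1]])
--         pfx = head
--     return maps
-- ===== Notes on version B (the rewrite author's own statement) =====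
-- stated objective: simpler
-- what changed: Replaces the counter-driven while loop that pops, re-negates and copies one shared mutable list with a loop that builds each row freshly from a shrinking prefix as head + [-last]; B does not mutate its argument (A destructively leaves it as [-first]), the equivalence is about the return value.
import Mathlib
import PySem

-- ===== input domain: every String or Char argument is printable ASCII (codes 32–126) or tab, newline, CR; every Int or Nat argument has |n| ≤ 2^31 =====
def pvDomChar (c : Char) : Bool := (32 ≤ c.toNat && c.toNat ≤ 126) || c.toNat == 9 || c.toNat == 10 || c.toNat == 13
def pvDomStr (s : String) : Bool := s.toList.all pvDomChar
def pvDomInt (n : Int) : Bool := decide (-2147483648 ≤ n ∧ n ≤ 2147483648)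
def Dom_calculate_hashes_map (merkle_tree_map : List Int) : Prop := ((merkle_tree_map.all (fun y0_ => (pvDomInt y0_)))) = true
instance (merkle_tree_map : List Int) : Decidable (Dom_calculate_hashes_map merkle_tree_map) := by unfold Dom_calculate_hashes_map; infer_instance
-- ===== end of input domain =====

-- B replaces A's while loop over one shared mutable list by a structural recursion on a
-- shrinking prefix (objective: simpler). A destructively mutates its argument (it ends
-- as [-first] when nonempty) while B leaves it untouched; the theorems below are about
-- the RETURN value only.

-- ===== PORT A =====
-- while i > 0: pop (if i < depth), negate last, append a copy, i -= 1.
-- The none branch of getLast? models Python's IndexError; it is never reached from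
-- calculate_hashes_map's entry state (the list always has i elements when i > 0).
def calcLoopA (mtm : List Int) (maps : List (List Int)) (i depth : Nat) :
    List (List Int) :=
  if _hi : i = 0 then maps
  else
    let mtm1 := if i < depth then mtm.dropLast else mtm
    match mtm1.getLast? with
    | none => maps
    | some x =>
      let mtm2 := mtm1.dropLast ++ [-x]
      calcLoopA mtm2 (maps ++ [mtm2]) (i - 1) depth
  termination_by i
  decreasing_by omega

def calculate_hashes_map (merkle_tree_map : List Int) : List (List Int) :=
  calcLoopA merkle_tree_map [] merkle_tree_map.length merkle_tree_map.length

-- ===== PORT B =====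
-- while pfx: head = pfx[:-1]; maps.append(head + [-pfx[-1]]); pfx = head.
-- The none branch of pyGet? is unreachable (pfx ≠ [] in that branch).
def calcLoopB (pfx : List Int) (maps : List (List Int)) : List (List Int) :=
  if hp : pfx = [] then maps
  else
    let head := PySem.List.slice pfx none (some (-1))
    match PySem.List.pyGet? pfx (-1) with
    | none => maps
    | some last => calcLoopB head (maps ++ [head ++ [-last]])
  termination_by pfx.length
  decreasing_by
    simp [PySem.List.slice_to_neg_one, List.length_dropLast]
    have := List.length_pos_iff.mpr hp
    omega

def calculate_hashes_map_alt (merkle_tree_map : List Int) : List (List Int) :=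
  calcLoopB merkle_tree_map []

-- ===== PRECONDITION & SPEC =====
def Spec_calculate_hashes_map (merkle_tree_map : List Int) (out : List (List Int)) : Prop := out = calculate_hashes_map_alt merkle_tree_map
instance (merkle_tree_map : List Int) (out : List (List Int)) : Decidable (Spec_calculate_hashes_map merkle_tree_map out) := by unfold Spec_calculate_hashes_map; infer_instance

-- ===== CLAIM (what is proved, stated in full; the proofs are below) =====
def Claim_equal_calculate_hashes_map : Prop := ∀ (merkle_tree_map : List Int), Dom_calculate_hashes_map merkle_tree_map → Spec_calculate_hashes_map merkle_tree_map (calculate_hashes_map merkle_tree_map)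

-- ===== LEMMAS AND PROOFS =====

-- One unfolding of calcLoopB on a list with an explicit last element.
theorem calcLoopB_append (l : List Int) (x : Int) (maps : List (List Int)) :
    calcLoopB (l ++ [x]) maps = calcLoopB l (maps ++ [l ++ [-x]]) := by
  rw [calcLoopB]
  simp [PySem.List.slice_to_neg_one, PySem.List.pyGet?_neg_one_append_singleton]

-- Loop invariant: entering an iteration with counter i, the (possibly popped)
-- working list equals orig.take i, and the two loops then extend the same
-- accumulator with the same rows.
theorem calcLoopA_eq (i : Nat) : ∀ (orig mtm : List Int) (maps : List (List Int)),
    i ≤ orig.length →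
    (i < orig.length → mtm.dropLast = orig.take i) →
    (i = orig.length → mtm = orig) →
    calcLoopA mtm maps i orig.length = calcLoopB (orig.take i) maps := by
  induction i with
  | zero =>
    intro orig mtm maps _ _ _
    rw [calcLoopA, calcLoopB]
    simp
  | succ n ih =>
    intro orig mtm maps hle hlt heq
    have hmtm1 : (if n + 1 < orig.length then mtm.dropLast else mtm) =
        orig.take (n + 1) := by
      by_cases h : n + 1 < orig.length
      · simp [h, hlt h]
      · have : n + 1 = orig.length := by omega
        simp [h, heq this, List.take_of_length_le (le_of_eq this.symm)]
    have hn : n < orig.length := by omega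
    have htake : orig.take (n + 1) = orig.take n ++ [orig[n]] := by
      rw [List.take_add_one]
      simp [List.getElem?_eq_getElem hn]
    rw [calcLoopA]
    simp only [Nat.succ_ne_zero, dite_false, hmtm1, htake]
    rw [List.getLast?_concat]
    simp only [List.dropLast_concat, Nat.add_sub_cancel]
    rw [ih orig (orig.take n ++ [-orig[n]]) (maps ++ [orig.take n ++ [-orig[n]]])
        (by omega)
        (fun _ => by simp)
        (fun h => by omega)]
    rw [calcLoopB_append]

-- ===== VERDICT (by name: the statement is the Claim_ definition above) =====
theorem calculate_hashes_map_spec : Claim_equal_calculate_hashes_map := by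
  intro mtm _
  unfold Spec_calculate_hashes_map calculate_hashes_map calculate_hashes_map_alt
  rw [calcLoopA_eq mtm.length mtm mtm [] le_rfl (by omega) (fun _ => rfl)]
  simp
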